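-- pv_equiv track=rewrite | github.com/sabzi1984/Intro-to-Algorithms | long & simple path.py | all_perms
-- ===== SOURCE A (Python) =====
-- def all_perms(seq):
--     #all permutations of the nodes
--     if len(seq) == 0: return [[]]
--     if len(seq) == 1: return [seq, []]
--     most = all_perms(seq[1:])
--     first = seq[0]
--     rest = []
--     for perm in most:
--         for i in range(len(perm)+1):
--             rest.append(perm[0:i] + [first] + perm[i:])
--     return most + rest
-- ===== SOURCE B (Python) =====
-- def all_perms(seq):
--     # Iterative bottom-up rewrite: unrolls A's recursion into a loop from the
--     # last element backwards, avoiding recursion and the repeated seq[1:] copies.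
--     if not seq:
--         return [[]]
--     res = [[seq[-1]], []]
--     for x in reversed(seq[:-1]):
--         res = res + [p[0:i] + [x] + p[i:] for p in res for i in range(len(p) + 1)]
--     return res
-- ===== Notes on version B (the rewrite author's own statement) =====
-- stated objective: alternative
-- what changed: Replaced A's head-recursion (which copies seq[1:] at every level and accumulates insertions with an explicit nested append loop) by an iterative bottom-up loop over reversed(seq[:-1]) that grows one result list with a comprehension of insertions.
import Mathlib
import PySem

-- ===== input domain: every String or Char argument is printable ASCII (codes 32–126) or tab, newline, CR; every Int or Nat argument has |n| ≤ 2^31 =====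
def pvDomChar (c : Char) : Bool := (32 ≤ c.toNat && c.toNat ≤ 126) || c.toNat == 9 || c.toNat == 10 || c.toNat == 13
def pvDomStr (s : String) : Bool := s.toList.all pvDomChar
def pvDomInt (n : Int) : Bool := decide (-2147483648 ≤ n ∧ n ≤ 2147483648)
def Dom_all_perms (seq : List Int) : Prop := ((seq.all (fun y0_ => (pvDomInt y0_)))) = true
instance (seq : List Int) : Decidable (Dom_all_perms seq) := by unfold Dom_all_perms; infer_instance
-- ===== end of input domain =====

-- B is an iterative bottom-up rewrite of A's recursion (same values, no recursion); A = B everywhere.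

-- ===== PORT A =====
-- literal transliteration of A: recursion on the tail (seq[1:]), nested for-loops
-- appending perm[0:i] + [first] + perm[i:] to rest, returning most + rest.
def all_perms (seq : List Int) : List (List Int) :=
  match seq with
  | [] => [[]]
  | [x] => [[x], []]                 -- len(seq) == 1: returns seq and []
  | x :: xs =>
    let most := all_perms xs         -- all_perms(seq[1:])
    let first := x
    let rest := most.foldl (fun rest perm =>
      (PySem.List.pyRange 0 ((perm.length : Int) + 1) 1).foldl
        (fun rest i =>
          rest ++ [PySem.List.slice perm (some 0) (some i) ++ [first]
                    ++ PySem.List.slice perm (some i) none]) rest)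
      ([] : List (List Int))
    most ++ rest

-- ===== PORT B =====
-- the comprehension [p[0:i] + [x] + p[i:] for i in range(len(p)+1)]
def insertAll (x : Int) (p : List Int) : List (List Int) :=
  (PySem.List.pyRange 0 ((p.length : Int) + 1) 1).map
    (fun i => PySem.List.slice p (some 0) (some i) ++ [x]
                ++ PySem.List.slice p (some i) none)

def all_perms_alt (seq : List Int) : List (List Int) :=
  match seq with
  | [] => [[]]
  | _ :: _ =>
    -- seq[-1]: the match guarantees seq ≠ [], so pyGet? is some; getD 0 is exact here
    ((PySem.List.slice seq none (some (-1))).reverse).foldl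
      (fun res x => res ++ res.flatMap (fun p => insertAll x p))
      [[(PySem.List.pyGet? seq (-1)).getD 0], []]

-- ===== PRECONDITION & SPEC =====
def Spec_all_perms (seq : List Int) (out : List (List Int)) : Prop := out = all_perms_alt seq
instance (seq : List Int) (out : List (List Int)) : Decidable (Spec_all_perms seq out) := by unfold Spec_all_perms; infer_instance

-- ===== CLAIM (what is proved, stated in full; the proofs are below) =====
def Claim_equal_all_perms : Prop := ∀ (seq : List Int), Dom_all_perms seq → Spec_all_perms seq (all_perms seq)

-- ===== LEMMAS AND PROOFS =====

-- A's recursive step, for a tail of length ≥ 1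
theorem all_perms_cons_cons (x y : Int) (t : List Int) :
    all_perms (x :: y :: t)
      = all_perms (y :: t) ++ (all_perms (y :: t)).flatMap (fun p => insertAll x p) := by
  simp only [all_perms, PySem.List.foldl_append_eq_flatMap, List.nil_append, insertAll,
    List.map_eq_flatMap]

-- B's loop performs the identical step
theorem all_perms_alt_cons_cons (x y : Int) (t : List Int) :
    all_perms_alt (x :: y :: t)
      = all_perms_alt (y :: t) ++ (all_perms_alt (y :: t)).flatMap (fun p => insertAll x p) := by
  show ((PySem.List.slice (x :: y :: t) none (some (-1))).reverse).foldl
        (fun res x => res ++ res.flatMap (fun p => insertAll x p))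
        [[(PySem.List.pyGet? (x :: y :: t) (-1)).getD 0], []]
      = _
  rw [PySem.List.slice_to_neg_one]
  have hdl : (x :: y :: t).dropLast = x :: (y :: t).dropLast := rfl
  rw [hdl, List.reverse_cons, List.foldl_append]
  have hlast : (PySem.List.pyGet? (x :: y :: t) (-1)).getD 0
      = (PySem.List.pyGet? (y :: t) (-1)).getD 0 := by
    rw [PySem.List.pyGet?_neg_one, PySem.List.pyGet?_neg_one, List.getLast?_cons_cons]
  rw [hlast]
  simp only [List.foldl_cons, List.foldl_nil]
  have hb : all_perms_alt (y :: t)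
      = ((PySem.List.slice (y :: t) none (some (-1))).reverse).foldl
          (fun res x => res ++ res.flatMap (fun p => insertAll x p))
          [[(PySem.List.pyGet? (y :: t) (-1)).getD 0], []] := rfl
  rw [hb, PySem.List.slice_to_neg_one]

theorem all_perms_eq_alt (seq : List Int) : all_perms seq = all_perms_alt seq := by
  induction seq with
  | nil => rfl
  | cons x xs ih =>
    cases xs with
    | nil =>
      show [[x], []] = _
      simp [all_perms_alt, PySem.List.slice_to_neg_one, PySem.List.pyGet?_neg_one]
    | cons y t =>
      rw [all_perms_cons_cons, all_perms_alt_cons_cons, ih]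

-- ===== VERDICT (by name: the statement is the Claim_ definition above) =====
theorem all_perms_spec : Claim_equal_all_perms := by
  intro seq _
  exact all_perms_eq_alt seq
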